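-- pv_equiv track=rewrite | github.com/Amandaa-S/bio_sat | src/f1.py | decode_from_model
-- ===== SOURCE A (Python) =====
-- def decode_from_model(model, genotypes, n, m):
--     """
--     Decodifica el modelo resultante en haplotipos y pares de haplotipos.
--
--     Entrada:
--     - model: Modelo resultante del solver, que contiene la asignación de variables.
--     - genotypes (list of lists): Lista de listas, donde cada lista representa un genotipo de tamaño m.
--     - n: Número de haplotipos (candidatos).
--     - m: Número de sitios polimórficos.
--
--     Salida:
--     - haplotypes (list of lists): Lista de haplotipos
--     - par_haplotypes: Lista de pares de haplotipos que explican cada genotipo.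
--     """
--
--     # Encuentra lista de haplotipos seleccionados
--     haplotypes = []
--     for k in range(n):
--         haplotype = [0] * m
--         for j in range(m):
--             if (k * m) + j + 1 in model:
--                 haplotype[j] = 1
--         haplotypes.append(haplotype)
--
--     # Decodificar los selectores
--     selector_a = [[(n * m) + (i * n) + k + 1 for k in range(n)] for i in range(len(genotypes))]
--     selector_b = [[(n * m) + (i * n) + n + k + 1 for k in range(n)] for i in range(len(genotypes))]
--
--     # Encuentra par de haplotipos que explican cada genotipo
--     par_haplotypes = []
--
--     for i in range(len(genotypes)):
--         haplotype_a, haplotype_b = None, None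
--
--         # Buscar el haplotipo seleccionado para selector_a
--         for k in range(n):
--             if selector_a[i][k] in model:
--                 haplotype_a = haplotypes[k]
--                 break
--
--         # Buscar el haplotipo seleccionado para selector_b
--         for k in range(n):
--             if selector_b[i][k] in model:
--                 haplotype_b = haplotypes[k]
--                 break
--
--         # Agregar el par de haplotipos que explican el genotipo i
--         if haplotype_a is not None and haplotype_b is not None:
--             par_haplotypes.append((haplotype_a, haplotype_b))
--     return haplotypes, par_haplotypes
-- ===== SOURCE B (Python) =====
-- def decode_from_model(model, genotypes, n, m):
--     g = len(genotypes)
--     nm = n * m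
--     # haplotypes start as zero matrices; one pass over the model sets the 1-bits
--     haplotypes = [[0] * m for _ in range(n)]
--     # slot[t] = smallest k with variable nm + t*n + k + 1 true; slot t doubles as
--     # selector_a of genotype t and selector_b of genotype t-1 (the ranges coincide)
--     slot = {}
--     for v in model:
--         if m > 0 and 1 <= v <= nm:
--             haplotypes[(v - 1) // m][(v - 1) % m] = 1
--         if n > 0:
--             o = v - nm
--             if 1 <= o <= (g + 1) * n:
--                 t, k = divmod(o - 1, n)
--                 if t not in slot or k < slot[t]:
--                     slot[t] = k
--     par_haplotypes = []
--     for i in range(g):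
--         if i in slot and i + 1 in slot:
--             par_haplotypes.append((haplotypes[slot[i]], haplotypes[slot[i + 1]]))
--     return haplotypes, par_haplotypes
-- ===== Notes on version B (the rewrite author's own statement) =====
-- stated objective: faster
-- what changed: Instead of testing membership in the model for every (haplotype,site) cell and every selector variable (a linear scan of the model each time), B makes a single pass over the model literals, decoding each literal into either a haplotype bit (set in a pre-built zero matrix) or a selector slot recorded in one min-k dictionary keyed by the slot index (slot t serves both as selector_a of genotype t and selector_b of genotype t-1, exploiting the overlap of the two selector ranges), then emits the pairs in one indexed sweep.
import Mathlib
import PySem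

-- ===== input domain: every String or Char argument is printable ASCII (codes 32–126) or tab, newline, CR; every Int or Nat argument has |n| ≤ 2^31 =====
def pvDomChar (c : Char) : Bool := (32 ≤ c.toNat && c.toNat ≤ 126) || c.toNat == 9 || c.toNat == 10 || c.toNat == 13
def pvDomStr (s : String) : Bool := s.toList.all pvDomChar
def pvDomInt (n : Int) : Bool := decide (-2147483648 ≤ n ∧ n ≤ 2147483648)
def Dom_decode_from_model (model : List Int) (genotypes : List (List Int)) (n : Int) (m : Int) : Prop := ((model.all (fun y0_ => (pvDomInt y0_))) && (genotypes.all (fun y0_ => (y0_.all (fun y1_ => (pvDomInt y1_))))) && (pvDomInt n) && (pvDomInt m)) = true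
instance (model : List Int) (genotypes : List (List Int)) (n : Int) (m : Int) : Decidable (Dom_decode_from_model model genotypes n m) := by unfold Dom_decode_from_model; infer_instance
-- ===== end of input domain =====

-- B replaces A's per-cell/per-selector scans of the model by one pass over the model literals,
-- decoding each literal into a haplotype bit or a min-k selector-slot dictionary entry (objective: faster).

-- ===== PORT A =====
def decode_from_model (model : List Int) (genotypes : List (List Int)) (n : Int) (m : Int) : List (List Int) × (List (List Int × List Int)) :=
  -- for k in range(n): build haplotype row by conditional assignment, append
  let haplotypes : List (List Int) :=
    (PySem.List.pyRange 0 n 1).foldl (fun haps k =>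
      let haplotype : List Int := List.replicate m.toNat 0
      let haplotype := (PySem.List.pyRange 0 m 1).foldl (fun hap j =>
          if model.contains (k * m + j + 1) then PySem.List.pySetD hap j 1 else hap) haplotype
      haps ++ [haplotype]) []
  -- selector_a / selector_b comprehensions
  let selector_a : List (List Int) :=
    (PySem.List.pyRange 0 (genotypes.length : Int) 1).map (fun i =>
      (PySem.List.pyRange 0 n 1).map (fun k => n * m + i * n + k + 1))
  let selector_b : List (List Int) :=
    (PySem.List.pyRange 0 (genotypes.length : Int) 1).map (fun i =>
      (PySem.List.pyRange 0 n 1).map (fun k => n * m + i * n + n + k + 1))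
  -- for i in range(len(genotypes)): first-match searches with break, then conditional append
  let par_haplotypes : List (List Int × List Int) :=
    (PySem.List.pyRange 0 (genotypes.length : Int) 1).foldl (fun par i =>
      let ha : Option (List Int) :=
        ((PySem.List.pyRange 0 n 1).find? (fun k =>
            model.contains (PySem.List.pyGetD (PySem.List.pyGetD selector_a i []) k 0))).map
          (fun k => PySem.List.pyGetD haplotypes k [])
      let hb : Option (List Int) :=
        ((PySem.List.pyRange 0 n 1).find? (fun k =>
            model.contains (PySem.List.pyGetD (PySem.List.pyGetD selector_b i []) k 0))).map
          (fun k => PySem.List.pyGetD haplotypes k [])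
      match ha, hb with
      | some a, some b => par ++ [(a, b)]
      | _, _ => par) []
  (haplotypes, par_haplotypes)

-- ===== PORT B =====
-- the body of B's single pass over the model literals (state = haplotype matrix, min-k slot dict)
def decode_from_model_alt_step (n m g : Int) (st : List (List Int) × PySem.Dict Int Int)
    (v : Int) : List (List Int) × PySem.Dict Int Int :=
  let H :=
    if 0 < m ∧ 1 ≤ v ∧ v ≤ n * m then
      -- indices (v-1)//m, (v-1)%m are in range by the guard
      let r := PySem.Int.floordiv (v - 1) m
      let c := PySem.Int.mod (v - 1) m
      PySem.List.pySetD st.1 r (PySem.List.pySetD (PySem.List.pyGetD st.1 r []) c 1)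
    else st.1
  let slot :=
    if 0 < n ∧ 1 ≤ v - n * m ∧ v - n * m ≤ (g + 1) * n then
      let t := PySem.Int.floordiv (v - n * m - 1) n
      let k := PySem.Int.mod (v - n * m - 1) n
      match st.2.get? t with
      | none => st.2.insert t k
      | some cur => if k < cur then st.2.insert t k else st.2
    else st.2
  (H, slot)

def decode_from_model_alt (model : List Int) (genotypes : List (List Int)) (n : Int) (m : Int) : List (List Int) × (List (List Int × List Int)) :=
  let g : Int := genotypes.length
  let st : List (List Int) × PySem.Dict Int Int :=
    model.foldl (decode_from_model_alt_step n m g)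
      ((List.range n.toNat).map (fun _ => List.replicate m.toNat 0), PySem.Dict.empty)
  let par_haplotypes : List (List Int × List Int) :=
    (PySem.List.pyRange 0 g 1).foldl (fun par i =>
      match st.2.get? i with
      | none => par
      | some a =>
        match st.2.get? (i + 1) with
        | none => par
        | some b => par ++ [(PySem.List.pyGetD st.1 a [], PySem.List.pyGetD st.1 b [])]) []
  (st.1, par_haplotypes)

-- ===== PRECONDITION & SPEC =====
def Spec_decode_from_model (model : List Int) (genotypes : List (List Int)) (n : Int) (m : Int) (out : List (List Int) × (List (List Int × List Int))) : Prop := out = decode_from_model_alt model genotypes n m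
instance (model : List Int) (genotypes : List (List Int)) (n : Int) (m : Int) (out : List (List Int) × (List (List Int × List Int))) : Decidable (Spec_decode_from_model model genotypes n m out) := by unfold Spec_decode_from_model; infer_instance

-- ===== CLAIM (what is proved, stated in full; the proofs are below) =====
def Claim_equal_decode_from_model : Prop := ∀ (model : List Int) (genotypes : List (List Int)) (n : Int) (m : Int), Dom_decode_from_model model genotypes n m → Spec_decode_from_model model genotypes n m (decode_from_model model genotypes n m)

-- ===== LEMMAS AND PROOFS =====

-- Canonical forms shared by both ports: the haplotype matrix and the first-match selector search.
def pvRow (model : List Int) (m : Int) (k : Int) : List Int :=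
  (List.range m.toNat).map (fun (j : Nat) => if model.contains (k * m + (j : Int) + 1) then 1 else 0)

def pvHaps (model : List Int) (n m : Int) : List (List Int) :=
  (List.range n.toNat).map (fun (k : Nat) => pvRow model m (k : Int))

def pvSel (model : List Int) (n nm t : Int) : Option Nat :=
  (List.range n.toNat).find? (fun (k : Nat) => model.contains (nm + t * n + (k : Int) + 1))

def pvPairs (model : List Int) (g n m : Int) : List (List Int × List Int) :=
  (PySem.List.pyRange 0 g 1).foldl (fun par i =>
    match pvSel model n (n * m) i, pvSel model n (n * m) (i + 1) with
    | some a, some b => par ++ [(pvRow model m (a : Int), pvRow model m (b : Int))]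
    | _, _ => par) []

-- B's two step functions (definitionally equal to the lambda in the port)
def pvStepH (n m : Int) (H : List (List Int)) (v : Int) : List (List Int) :=
  if 0 < m ∧ 1 ≤ v ∧ v ≤ n * m then
    PySem.List.pySetD H (PySem.Int.floordiv (v - 1) m)
      (PySem.List.pySetD (PySem.List.pyGetD H (PySem.Int.floordiv (v - 1) m) [])
        (PySem.Int.mod (v - 1) m) 1)
  else H

def pvStepS (n m g : Int) (d : PySem.Dict Int Int) (v : Int) : PySem.Dict Int Int :=
  if 0 < n ∧ 1 ≤ v - n * m ∧ v - n * m ≤ (g + 1) * n then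
    match d.get? (PySem.Int.floordiv (v - n * m - 1) n) with
    | none => d.insert (PySem.Int.floordiv (v - n * m - 1) n) (PySem.Int.mod (v - n * m - 1) n)
    | some cur =>
      if PySem.Int.mod (v - n * m - 1) n < cur then
        d.insert (PySem.Int.floordiv (v - n * m - 1) n) (PySem.Int.mod (v - n * m - 1) n)
      else d
  else d

lemma pvFind?_congr {α : Type} (l : List α) (p q : α → Bool) (h : ∀ x ∈ l, p x = q x) :
    l.find? p = l.find? q := by
  induction l with
  | nil => rfl
  | cons x xs ih =>
    simp only [List.find?]
    rw [h x (by simp)]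
    split
    · rfl
    · exact ih (fun y hy => h y (by simp [hy]))

lemma pvSet_map_range {α : Type} (f : Nat → α) (N r : Nat) (v : α) :
    ((List.range N).map f).set r v = (List.range N).map (fun k => if k = r then v else f k) := by
  apply List.ext_getElem
  · simp
  · intro i h1 h2
    rw [List.getElem_set]
    simp only [List.getElem_map, List.getElem_range]
    split <;> simp_all [eq_comm]

lemma pvSetLast {α : Type} (l : List α) (x v : α) : (l ++ [x]).set l.length v = l ++ [v] := by
  rw [List.set_append_right _ _ (le_refl _)]
  simp

lemma pvDecodeUnique (n t t0 k k0 : Int) (hn : 0 < n) (hk : 0 ≤ k) (hk' : k < n)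
    (hk0 : 0 ≤ k0) (hk0' : k0 < n) (h : t * n + k = t0 * n + k0) : t = t0 ∧ k = k0 := by
  have ht : t = t0 := by
    rcases lt_trichotomy t t0 with hlt | heq | hgt
    · have h1 : (t + 1) * n ≤ t0 * n := mul_le_mul_of_nonneg_right (by omega) (le_of_lt hn)
      nlinarith
    · exact heq
    · have h1 : (t0 + 1) * n ≤ t * n := mul_le_mul_of_nonneg_right (by omega) (le_of_lt hn)
      nlinarith
  subst ht
  exact ⟨rfl, by omega⟩

-- fold of conditional single-cell assignments only touches indices below r.length
lemma pvFoldSet_append (model : List Int) (m kk : Int) (l : List Int) (r t : List Int)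
    (h : ∀ j ∈ l, 0 ≤ j ∧ j < (r.length : Int)) :
    l.foldl (fun hap j => if model.contains (kk * m + j + 1) then PySem.List.pySetD hap j 1 else hap) (r ++ t)
    = (l.foldl (fun hap j => if model.contains (kk * m + j + 1) then PySem.List.pySetD hap j 1 else hap) r) ++ t := by
  induction l generalizing r with
  | nil => rfl
  | cons j js ih =>
    obtain ⟨hj0, hjlen⟩ := h j (by simp)
    have hcast : j = ((j.toNat : Nat) : Int) := by omega
    simp only [List.foldl_cons]
    have hstep : (if model.contains (kk * m + j + 1) then PySem.List.pySetD (r ++ t) j 1 else r ++ t)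
        = (if model.contains (kk * m + j + 1) then PySem.List.pySetD r j 1 else r) ++ t := by
      split
      · rw [hcast, PySem.List.pySetD_natCast, PySem.List.pySetD_natCast,
            List.set_append_left _ _ (by omega)]
      · rfl
    rw [hstep]
    refine ih _ (fun x hx => ?_)
    have hh := h x (by simp [hx])
    have hlen : (if model.contains (kk * m + j + 1) = true then PySem.List.pySetD r j 1 else r).length
        = r.length := by
      split
      · simp [PySem.List.length_pySetD]
      · rfl
    rw [hlen]
    exact hh

-- A's inner row loop, generalized over the range bound
lemma pvRowA (model : List Int) (m kk : Int) (M : Nat) :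
    (PySem.List.pyRange 0 (M : Int) 1).foldl
      (fun hap j => if model.contains (kk * m + j + 1) then PySem.List.pySetD hap j 1 else hap)
      (List.replicate M (0 : Int))
    = (List.range M).map (fun (j : Nat) => if model.contains (kk * m + (j : Int) + 1) then 1 else 0) := by
  induction M with
  | zero =>
    rw [show ((0 : Nat) : Int) = 0 from rfl, PySem.List.pyRange_one_eq_nil (le_refl 0)]
    simp
  | succ M ih =>
    rw [show ((M + 1 : Nat) : Int) = (M : Int) + 1 by push_cast; ring,
        PySem.List.pyRange_one_succ_right (by positivity), List.foldl_append,
        List.replicate_succ' , pvFoldSet_append model m kk _ _ _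
          (fun j hj => by
            have := (PySem.List.mem_pyRange_one).1 hj
            simp only [List.length_replicate]
            omega),
        ih]
    simp only [List.foldl_cons, List.foldl_nil, List.range_succ, List.map_append, List.map_cons,
      List.map_nil]
    split
    · rw [show ((M : Int)) = ((M : Nat) : Int) from rfl, PySem.List.pySetD_natCast]
      have hset := pvSetLast ((List.range M).map (fun (j : Nat) => if model.contains (kk * m + (j : Int) + 1) then 1 else 0)) (0 : Int) 1
      simp only [List.length_map, List.length_range] at hset
      rw [hset]
    · simp_all

lemma pvRowA' (model : List Int) (m kk : Int) :
    (PySem.List.pyRange 0 m 1).foldl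
      (fun hap j => if model.contains (kk * m + j + 1) then PySem.List.pySetD hap j 1 else hap)
      (List.replicate m.toNat (0 : Int))
    = pvRow model m kk := by
  unfold pvRow
  by_cases hm : m ≤ 0
  · rw [PySem.List.pyRange_one_eq_nil hm]
    simp [Int.toNat_of_nonpos hm]
  · have h : m = ((m.toNat : Nat) : Int) := by omega
    rw [h]
    simp only [Int.toNat_natCast]
    exact pvRowA model ((m.toNat : Nat) : Int) kk m.toNat

lemma pvHapsA (model : List Int) (n m : Int) :
    (PySem.List.pyRange 0 n 1).foldl (fun haps k => haps ++
      [(PySem.List.pyRange 0 m 1).foldl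
        (fun hap j => if model.contains (k * m + j + 1) then PySem.List.pySetD hap j 1 else hap)
        (List.replicate m.toNat (0 : Int))]) []
    = pvHaps model n m := by
  rw [PySem.List.foldl_append_singleton_eq_map]
  simp only [pvRowA']
  rw [PySem.List.pyRange_one]
  unfold pvHaps
  rw [List.map_map]
  simp only [sub_zero]
  apply List.map_congr_left
  intro k _
  simp [Function.comp, pvRow]

-- split a foldl over a pair with componentwise updates
lemma pvFoldPair' {α β ι : Type} (f : α × β → ι → α × β) (f1 : α → ι → α) (f2 : β → ι → β)
    (h : ∀ st v, f st v = (f1 st.1 v, f2 st.2 v)) (l : List ι) (a : α) (b : β) :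
    l.foldl f (a, b) = (l.foldl f1 a, l.foldl f2 b) := by
  induction l generalizing a b with
  | nil => rfl
  | cons x xs ih =>
    rw [List.foldl_cons, h]
    exact ih _ _

-- B's one-pass haplotype update, characterized on matrices in map-over-range form
lemma pvFoldH (n m : Int) (l : List Int) (F : Nat → Nat → Int) :
    l.foldl (pvStepH n m)
      ((List.range n.toNat).map (fun (k : Nat) => (List.range m.toNat).map (fun (j : Nat) => F k j)))
    = (List.range n.toNat).map (fun (k : Nat) => (List.range m.toNat).map (fun (j : Nat) =>
        if l.contains ((k : Int) * m + (j : Int) + 1) then 1 else F k j)) := by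
  induction l generalizing F with
  | nil => simp
  | cons v l ih =>
    simp only [List.foldl_cons]
    have hstep : pvStepH n m
        ((List.range n.toNat).map (fun (k : Nat) => (List.range m.toNat).map (fun (j : Nat) => F k j))) v
        = (List.range n.toNat).map (fun (k : Nat) => (List.range m.toNat).map (fun (j : Nat) =>
            if v = (k : Int) * m + (j : Int) + 1 then 1 else F k j)) := by
      unfold pvStepH
      split
      case isTrue hcond =>
        obtain ⟨hm, hv1, hv2⟩ := hcond
        have hn : 0 < n := by nlinarith
        have hNn : ((n.toNat : Nat) : Int) = n := by omega
        have hMm : ((m.toNat : Nat) : Int) = m := by omega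
        rw [PySem.Int.floordiv_eq_ediv_of_pos hm, PySem.Int.mod_eq_emod_of_pos hm]
        have h0r : 0 ≤ (v - 1) / m := Int.ediv_nonneg (by omega) (by omega)
        have hrn : (v - 1) / m < n := by
          rw [Int.ediv_lt_iff_lt_mul hm]
          omega
        have h0c : 0 ≤ (v - 1) % m := Int.emod_nonneg _ (by omega)
        have hcm : (v - 1) % m < m := Int.emod_lt_of_pos _ hm
        have hdm : ((v - 1) / m) * m + (v - 1) % m = v - 1 := by
          have h1 := Int.ediv_add_emod (v - 1) m
          have h2 : m * ((v - 1) / m) = ((v - 1) / m) * m := mul_comm _ _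
          omega
        obtain ⟨rN, hrcast⟩ : ∃ rN : Nat, (v - 1) / m = (rN : Int) :=
          ⟨((v - 1) / m).toNat, by omega⟩
        obtain ⟨cN, hccast⟩ : ∃ cN : Nat, (v - 1) % m = (cN : Int) :=
          ⟨((v - 1) % m).toNat, by omega⟩
        rw [hrcast, hccast] at hdm
        have hrNlt : rN < n.toNat := by omega
        have hcNlt : cN < m.toNat := by omega
        rw [hrcast, hccast, PySem.List.pyGetD_natCast, PySem.List.pySetD_natCast]
        have hgetrow : ((List.range n.toNat).map (fun (k : Nat) => (List.range m.toNat).map (fun (j : Nat) => F k j))).getD rN []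
            = (List.range m.toNat).map (fun (j : Nat) => F rN j) := by
          simp [List.getD_eq_getElem?_getD, hrNlt]
        rw [hgetrow, PySem.List.pySetD_natCast, pvSet_map_range, pvSet_map_range]
        apply List.map_congr_left
        intro k hk
        simp only [List.mem_range] at hk
        by_cases hkr : k = rN
        · subst hkr
          simp only [if_pos]
          apply List.map_congr_left
          intro j hj
          simp only [List.mem_range] at hj
          have hiff : (v = ((k : Nat) : Int) * m + (j : Int) + 1) ↔ j = cN := by
            constructor
            · intro hveq
              omega
            · intro hjc
              subst hjc
              omega
          simp only [hiff]
        · simp only [if_neg hkr]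
          apply List.map_congr_left
          intro j hj
          simp only [List.mem_range] at hj
          have hne : v ≠ (k : Int) * m + (j : Int) + 1 := by
            intro hveq
            have hh : (k : Int) * m + (j : Int) = ((rN : Nat) : Int) * m + ((cN : Nat) : Int) := by omega
            have huniq := pvDecodeUnique m (k : Int) ((rN : Nat) : Int) (j : Int) ((cN : Nat) : Int) hm
              (by omega) (by omega) (by omega) (by omega) hh
            omega
          simp [hne]
      case isFalse hcond =>
        apply List.map_congr_left
        intro k hk
        simp only [List.mem_range] at hk
        apply List.ext_getElem
        · simp
        · intro j hj1 hj2
          simp only [List.getElem_map, List.getElem_range] at *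
          have hjM : j < m.toNat := by simpa using hj1
          have hne : v ≠ (k : Int) * m + (j : Int) + 1 := by
            intro hveq
            apply hcond
            have hm : 0 < m := by omega
            have hkn : (k : Int) < n := by omega
            have hj' : (j : Int) < m := by omega
            have hkm : 0 ≤ (k : Int) * m := mul_nonneg (by positivity) (by omega)
            refine ⟨hm, by omega, ?_⟩
            have h1 : (k : Int) * m ≤ (n - 1) * m :=
              mul_le_mul_of_nonneg_right (by omega) (by omega)
            have h2 : (n - 1) * m = n * m - m := by ring
            omega
          simp [hne]
    rw [hstep, ih]
    apply List.map_congr_left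
    intro k _
    apply List.map_congr_left
    intro j _
    by_cases hveq : v = (k : Int) * m + (j : Int) + 1 <;>
      by_cases hlc : l.contains ((k : Int) * m + (j : Int) + 1) <;>
        simp_all [eq_comm]

lemma pvHapsB (model : List Int) (n m : Int) :
    model.foldl (pvStepH n m) ((List.range n.toNat).map (fun _ => List.replicate m.toNat (0 : Int)))
    = pvHaps model n m := by
  have h0 : (List.range n.toNat).map (fun (_ : Nat) => List.replicate m.toNat (0 : Int))
      = (List.range n.toNat).map (fun (_ : Nat) => (List.range m.toNat).map (fun (_ : Nat) => (0 : Int))) := by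
    simp [List.map_const']
  rw [h0, pvFoldH]
  unfold pvHaps pvRow
  rfl

-- first match of (p k or k = k0) on range N is the min of (first match of p) and k0
lemma pvFindOrMin (N k0 : Nat) (hk0 : k0 < N) (p : Nat → Bool) :
    (List.range N).find? (fun k => p k || k == k0)
    = some (match (List.range N).find? p with | none => k0 | some a => min a k0) := by
  have hsplit : List.range N = List.range k0 ++ (List.range (N - k0)).map (k0 + ·) := by
    rw [← List.range_add]
    congr 1
    omega
  rw [hsplit, List.find?_append, List.find?_append]
  have hpre : (List.range k0).find? (fun k => p k || k == k0) = (List.range k0).find? p := by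
    apply pvFind?_congr
    intro x hx
    simp only [List.mem_range] at hx
    simp [Nat.ne_of_lt hx]
  rw [hpre]
  rcases hfp : (List.range k0).find? p with _ | a
  · have hsnd : ((List.range (N - k0)).map (k0 + ·)).find? (fun k => p k || k == k0) = some k0 := by
      have hNk : N - k0 = (N - k0 - 1) + 1 := by omega
      rw [hNk, List.range_succ_eq_map]
      simp
    rw [hsnd]
    simp only [Option.none_or]
    rcases hfs : ((List.range (N - k0)).map (k0 + ·)).find? p with _ | b
    · simp
    · have hbmem := List.mem_of_find?_eq_some hfs
      simp only [List.mem_map, List.mem_range] at hbmem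
      obtain ⟨c, _, hc⟩ := hbmem
      simp only [Option.some_inj]
      exact (Nat.min_eq_right (by omega)).symm
  · have ha := List.mem_of_find?_eq_some hfp
    simp only [List.mem_range] at ha
    simp only [Option.some_or, Option.some_inj]
    exact (Nat.min_eq_left (by omega)).symm

-- the dictionary built by B's single pass holds, for each slot in [0, g], the minimal matching k
lemma pvFoldS (n m g : Int) (_hg : 0 ≤ g) (l : List Int) (t : Int) (ht0 : 0 ≤ t) (htg : t ≤ g) :
    (l.foldl (pvStepS n m g) PySem.Dict.empty).get? t
    = (pvSel l n (n * m) t).map (fun (k : Nat) => (k : Int)) := by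
  induction l using List.reverseRecOn with
  | nil =>
    have h1 : (PySem.Dict.empty : PySem.Dict Int Int).get? t = none := by
      simp [PySem.Dict.get?, PySem.Dict.empty]
    have h2 : pvSel [] n (n * m) t = none := by
      unfold pvSel
      rw [List.find?_eq_none]
      intro x _
      simp
    simp [h1, h2]
  | append_singleton l v ih =>
    rw [List.foldl_append]
    simp only [List.foldl_cons, List.foldl_nil]
    set D := List.foldl (pvStepS n m g) PySem.Dict.empty l with hD
    unfold pvStepS
    by_cases hcond : 0 < n ∧ 1 ≤ v - n * m ∧ v - n * m ≤ (g + 1) * n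
    case neg =>
      rw [if_neg hcond, ih]
      congr 1
      unfold pvSel
      apply pvFind?_congr
      intro k hk
      simp only [List.mem_range] at hk
      have hkey : ¬ (v = n * m + t * n + (k : Int) + 1) := by
        intro hv
        have hn : 0 < n := by omega
        have h1 : 0 ≤ t * n := mul_nonneg ht0 (by omega)
        have h2 : t * n ≤ g * n := mul_le_mul_of_nonneg_right htg (by omega)
        have h3 : (g + 1) * n = g * n + n := by ring
        have h4 : (k : Int) < n := by omega
        exact hcond ⟨hn, by omega, by omega⟩
      have hkey' : ¬ (n * m + t * n + (k : Int) + 1 = v) := fun h => hkey h.symm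
      simp [hkey']
    case pos =>
      obtain ⟨hn, ho1, ho2⟩ := hcond
      rw [if_pos ⟨hn, ho1, ho2⟩]
      rw [PySem.Int.floordiv_eq_ediv_of_pos hn, PySem.Int.mod_eq_emod_of_pos hn]
      have ht0r : 0 ≤ (v - n * m - 1) / n := Int.ediv_nonneg (by omega) (by omega)
      have ht0g : (v - n * m - 1) / n ≤ g := by
        have hlt : (v - n * m - 1) / n < g + 1 := by
          rw [Int.ediv_lt_iff_lt_mul hn]
          have h3 : (g + 1) * n = g * n + n := by ring
          omega
        omega
      have hk0 : 0 ≤ (v - n * m - 1) % n := Int.emod_nonneg _ (by omega)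
      have hk0n : (v - n * m - 1) % n < n := Int.emod_lt_of_pos _ hn
      have hdm : ((v - n * m - 1) / n) * n + (v - n * m - 1) % n = v - n * m - 1 := by
        have h1 := Int.ediv_add_emod (v - n * m - 1) n
        have h2 : n * ((v - n * m - 1) / n) = ((v - n * m - 1) / n) * n := mul_comm _ _
        omega
      by_cases ht : t = (v - n * m - 1) / n
      · rw [← ht] at ht0r ht0g hdm ⊢
        obtain ⟨k0N, hk0cast⟩ : ∃ k0N : Nat, (v - n * m - 1) % n = (k0N : Int) :=
          ⟨((v - n * m - 1) % n).toNat, by omega⟩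
        have hk0Nlt : k0N < n.toNat := by omega
        have hselEq : pvSel (l ++ [v]) n (n * m) t
            = some (match pvSel l n (n * m) t with | none => k0N | some a => min a k0N) := by
          unfold pvSel
          rw [pvFind?_congr _ _ (fun (k : Nat) =>
              (l.contains (n * m + t * n + (k : Int) + 1) || (k == k0N)))
            (by
              intro k hkmem
              simp only [List.mem_range] at hkmem
              have hiff : (v = n * m + t * n + (k : Int) + 1) ↔ k = k0N := by
                constructor
                · intro hveq
                  omega
                · intro hkk
                  subst hkk
                  omega
              by_cases hkk : k = k0N
              · have hv' : n * m + t * n + ((k0N : Nat) : Int) + 1 = v := by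
                  have h' := (hiff.mpr hkk).symm
                  omega
                simp [hkk, hv']
              · have hne' : ¬ (n * m + t * n + (k : Int) + 1 = v) :=
                  fun h => hkk (hiff.mp h.symm)
                simp [hkk, hne'])]
          exact pvFindOrMin n.toNat k0N hk0Nlt _
        rw [hselEq, ih]
        rcases hsel : pvSel l n (n * m) t with _ | a
        · simp only [Option.map_none]
          rw [PySem.Dict.get?_insert_self]
          simp only [Option.map_some, Option.some_inj]
          omega
        · simp only [Option.map_some]
          by_cases hlt : (v - n * m - 1) % n < (a : Int)
          · rw [if_pos hlt, PySem.Dict.get?_insert_self]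
            simp only [Option.some_inj]
            rw [Nat.min_eq_right (by omega)]
            omega
          · rw [if_neg hlt, ih, hsel]
            simp only [Option.map_some, Option.some_inj]
            rw [Nat.min_eq_left (by omega)]
      · have hne_keys : ∀ k : Nat, k < n.toNat → ¬ (v = n * m + t * n + (k : Int) + 1) := by
          intro k hk hveq
          have hh : t * n + (k : Int) = ((v - n * m - 1) / n) * n + ((v - n * m - 1) % n) := by
            omega
          have huniq := pvDecodeUnique n t ((v - n * m - 1) / n) (k : Int)
            ((v - n * m - 1) % n) hn (by omega) (by omega) hk0 hk0n hh
          exact ht huniq.1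
        have hselEq : pvSel (l ++ [v]) n (n * m) t = pvSel l n (n * m) t := by
          unfold pvSel
          apply pvFind?_congr
          intro k hkmem
          simp only [List.mem_range] at hkmem
          have hne' : ¬ (n * m + t * n + (k : Int) + 1 = v) :=
            fun h => hne_keys k hkmem h.symm
          simp [hne']
        rw [hselEq, ← ih]
        rcases hget : D.get? ((v - n * m - 1) / n) with _ | cur
        · exact PySem.Dict.get?_insert_of_ne _ _ ht
        · by_cases hlt : (v - n * m - 1) % n < cur
          · simp only [if_pos hlt]
            exact PySem.Dict.get?_insert_of_ne _ _ ht
          · simp only [if_neg hlt]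

lemma pvGetHaps (model : List Int) (n m : Int) (a : Nat) (ha : a < n.toNat) :
    PySem.List.pyGetD (pvHaps model n m) ((a : Nat) : Int) [] = pvRow model m (a : Int) := by
  rw [PySem.List.pyGetD_natCast]
  unfold pvHaps
  simp [List.getD_eq_getElem?_getD, ha]

lemma pvSelBound (model : List Int) (n nm t : Int) (a : Nat)
    (h : pvSel model n nm t = some a) : a < n.toNat := by
  unfold pvSel at h
  have hmem := List.mem_of_find?_eq_some h
  simpa using hmem

lemma pvFindSel (model : List Int) (n m t : Int) :
    ((PySem.List.pyRange 0 n 1).find? (fun k => model.contains (n * m + t * n + k + 1))).map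
      (fun k => PySem.List.pyGetD (pvHaps model n m) k [])
    = (pvSel model n (n * m) t).map (fun (a : Nat) => pvRow model m (a : Int)) := by
  rw [PySem.List.pyRange_one, List.find?_map, Option.map_map]
  simp only [Function.comp_def, sub_zero, zero_add]
  unfold pvSel
  rcases hfind : (List.range n.toNat).find? (fun (k : Nat) => model.contains (n * m + t * n + (k : Int) + 1)) with _ | a
  · rfl
  · have hmem := List.mem_of_find?_eq_some hfind
    simp only [List.mem_range] at hmem
    simp only [Option.map_some, Option.some_inj]
    exact pvGetHaps model n m a hmem

lemma pvA_eq (model : List Int) (genotypes : List (List Int)) (n m : Int) :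
    decode_from_model model genotypes n m
    = (pvHaps model n m, pvPairs model (genotypes.length : Int) n m) := by
  simp only [decode_from_model]
  rw [pvHapsA]
  simp only [Prod.mk.injEq]
  refine ⟨trivial, ?_⟩
  unfold pvPairs
  apply PySem.List.foldl_congr_mem
  intro acc i hi
  obtain ⟨hi0, hig⟩ := (PySem.List.mem_pyRange_one).1 hi
  rw [PySem.List.pyGetD_map_pyRange_of_nonneg
        (fun i2 => (PySem.List.pyRange 0 n 1).map (fun k2 => n * m + i2 * n + k2 + 1))
        _ _ _ hi0 hig,
      PySem.List.pyGetD_map_pyRange_of_nonneg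
        (fun i2 => (PySem.List.pyRange 0 n 1).map (fun k2 => n * m + i2 * n + n + k2 + 1))
        _ _ _ hi0 hig]
  have hA : ((PySem.List.pyRange 0 n 1).find? (fun k =>
        model.contains (PySem.List.pyGetD ((PySem.List.pyRange 0 n 1).map (fun k2 => n * m + i * n + k2 + 1)) k 0))).map
      (fun k => PySem.List.pyGetD (pvHaps model n m) k [])
      = (pvSel model n (n * m) i).map (fun (a : Nat) => pvRow model m (a : Int)) := by
    rw [pvFind?_congr _ _ (fun k => model.contains (n * m + i * n + k + 1)) (by
      intro x hx
      obtain ⟨hx0, hxn⟩ := (PySem.List.mem_pyRange_one).1 hx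
      rw [PySem.List.pyGetD_map_pyRange_of_nonneg _ _ _ _ hx0 hxn])]
    exact pvFindSel model n m i
  have hB : ((PySem.List.pyRange 0 n 1).find? (fun k =>
        model.contains (PySem.List.pyGetD ((PySem.List.pyRange 0 n 1).map (fun k2 => n * m + i * n + n + k2 + 1)) k 0))).map
      (fun k => PySem.List.pyGetD (pvHaps model n m) k [])
      = (pvSel model n (n * m) (i + 1)).map (fun (a : Nat) => pvRow model m (a : Int)) := by
    rw [pvFind?_congr _ _ (fun k => model.contains (n * m + (i + 1) * n + k + 1)) (by
      intro x hx
      obtain ⟨hx0, hxn⟩ := (PySem.List.mem_pyRange_one).1 hx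
      rw [PySem.List.pyGetD_map_pyRange_of_nonneg _ _ _ _ hx0 hxn]
      congr 1
      ring)]
    exact pvFindSel model n m (i + 1)
  rw [hA, hB]
  rcases pvSel model n (n * m) i with _ | aN <;>
    rcases pvSel model n (n * m) (i + 1) with _ | bN <;> rfl

lemma pvB_eq (model : List Int) (genotypes : List (List Int)) (n m : Int) :
    decode_from_model_alt model genotypes n m
    = (pvHaps model n m, pvPairs model (genotypes.length : Int) n m) := by
  simp only [decode_from_model_alt]
  rw [pvFoldPair' (decode_from_model_alt_step n m (genotypes.length : Int))
        (pvStepH n m) (pvStepS n m (genotypes.length : Int)) (fun _ _ => rfl) model _ _]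
  rw [pvHapsB]
  simp only [Prod.mk.injEq]
  refine ⟨trivial, ?_⟩
  unfold pvPairs
  apply PySem.List.foldl_congr_mem
  intro acc i hi
  obtain ⟨hi0, hig⟩ := (PySem.List.mem_pyRange_one).1 hi
  have hg : (0 : Int) ≤ (genotypes.length : Int) := by positivity
  rw [pvFoldS n m (genotypes.length : Int) hg model i hi0 (by omega),
      pvFoldS n m (genotypes.length : Int) hg model (i + 1) (by omega) (by omega)]
  rcases hA : pvSel model n (n * m) i with _ | aN <;>
    rcases hB : pvSel model n (n * m) (i + 1) with _ | bN
  · rfl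
  · rfl
  · rfl
  · simp only [Option.map_some]
    rw [pvGetHaps model n m aN (pvSelBound model n (n * m) i aN hA),
        pvGetHaps model n m bN (pvSelBound model n (n * m) (i + 1) bN hB)]

-- ===== VERDICT (by name: the statement is the Claim_ definition above) =====
theorem decode_from_model_spec : Claim_equal_decode_from_model := by
  intro model genotypes n m _
  unfold Spec_decode_from_model
  rw [pvA_eq, pvB_eq]
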